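-- pv_equiv track=rewrite | github.com/hyoti33333/hyori_programers | 프로그래머스/0/181837. 커피 심부름/커피 심부름.py | solution
-- ===== SOURCE A (Python) =====
-- def solution(order):
--     money = 0
--     for od in range(len(order)):
--         if "cafelatte" in order[od]:
--             money += 5000
--         else:
--             money += 4500
--     return money
-- ===== SOURCE B (Python) =====
-- def solution(order):
--     def total(lo, hi):
--         if hi - lo <= 0:
--             return 0
--         if hi - lo == 1:
--             return 5000 if "cafelatte" in order[lo] else 4500
--         mid = (lo + hi) // 2
--         return total(lo, mid) + total(mid, hi)
--     return total(0, len(order))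
-- ===== Notes on version B (the rewrite author's own statement) =====
-- stated objective: alternative
-- what changed: Replaces A's linear index loop with a conditional accumulator by a divide-and-conquer recursion: the interval [0, len) is split at its midpoint, leaves price a single item, and the two half-totals are summed.
import Mathlib
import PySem

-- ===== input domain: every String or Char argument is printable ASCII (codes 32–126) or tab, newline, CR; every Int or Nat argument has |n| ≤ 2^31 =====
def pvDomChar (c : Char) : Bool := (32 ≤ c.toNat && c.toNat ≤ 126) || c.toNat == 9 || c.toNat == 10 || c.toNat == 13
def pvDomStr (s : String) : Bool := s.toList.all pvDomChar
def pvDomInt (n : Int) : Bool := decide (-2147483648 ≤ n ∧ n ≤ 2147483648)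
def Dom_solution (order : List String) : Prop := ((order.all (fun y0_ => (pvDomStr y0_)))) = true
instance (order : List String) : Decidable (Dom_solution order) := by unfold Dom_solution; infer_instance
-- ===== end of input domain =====

-- B replaces A's linear index loop (conditional accumulator) by a divide-and-conquer
-- recursion that splits the index interval at its midpoint (objective: alternative).

-- ===== PORT A =====
def solution (order : List String) : Int :=
  (PySem.List.pyRange 0 order.length 1).foldl
    (fun money od =>
      if PySem.Str.isIn "cafelatte" (PySem.List.pyGetD order od "") then money + 5000
      else money + 4500) 0

-- ===== PORT B =====
-- inner 'total(lo, hi)' of Source B; order[lo] is only reached with 0 ≤ lo < len(order),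
-- where pyGetD equals Python's order[lo] exactly.
def solutionAltTotal (order : List String) (lo hi : Int) : Int :=
  if _hle : hi - lo ≤ 0 then 0
  else if _h1 : hi - lo = 1 then
    if PySem.Str.isIn "cafelatte" (PySem.List.pyGetD order lo "") then 5000 else 4500
  else
    let mid := PySem.Int.floordiv (lo + hi) 2
    solutionAltTotal order lo mid + solutionAltTotal order mid hi
termination_by (hi - lo).toNat
decreasing_by
  · rw [PySem.Int.floordiv_eq_ediv_of_pos (by omega)]; omega
  · rw [PySem.Int.floordiv_eq_ediv_of_pos (by omega)]; omega

def solution_alt (order : List String) : Int :=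
  solutionAltTotal order 0 order.length

-- ===== PRECONDITION & SPEC =====
def Spec_solution (order : List String) (out : Int) : Prop := out = solution_alt order
instance (order : List String) (out : Int) : Decidable (Spec_solution order out) := by unfold Spec_solution; infer_instance

-- ===== CLAIM (what is proved, stated in full; the proofs are below) =====
def Claim_equal_solution : Prop := ∀ (order : List String), Dom_solution order → Spec_solution order (solution order)

-- ===== LEMMAS AND PROOFS =====

def pvPrice (o : String) : Int := if PySem.Str.isIn "cafelatte" o then 5000 else 4500

def pvSum (xs : List String) : Int := (xs.map pvPrice).sum

theorem total_eq_pvSum (order : List String) :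
    ∀ (n : Nat) (lo hi : Int), (hi - lo).toNat ≤ n → 0 ≤ lo → hi ≤ order.length →
      solutionAltTotal order lo hi = pvSum ((order.drop lo.toNat).take (hi - lo).toNat) := by
  intro n
  induction n with
  | zero =>
    intro lo hi hn _ _
    rw [solutionAltTotal]
    simp only [show hi - lo ≤ 0 by omega, dif_pos]
    simp [show (hi - lo).toNat = 0 by omega, pvSum]
  | succ n ih =>
    intro lo hi hn hlo hhi
    rw [solutionAltTotal]
    by_cases hle : hi - lo ≤ 0
    · simp only [hle, dif_pos]
      simp [show (hi - lo).toNat = 0 by omega, pvSum]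
    · by_cases h1 : hi - lo = 1
      · simp only [h1, dif_pos]
        have hlt : lo.toNat < order.length := by omega
        have hget : PySem.List.pyGetD order lo "" = order.getD lo.toNat "" := by
          conv_lhs => rw [show lo = ((lo.toNat : Nat) : Int) by omega]
          exact PySem.List.pyGetD_natCast order lo.toNat ""
        rw [hget, List.drop_eq_getElem_cons hlt]
        simp [pvSum, pvPrice, List.getD_eq_getElem?_getD, hlt]
      · simp only [hle, h1]
        have h2 : 2 ≤ hi - lo := by omega
        rw [PySem.Int.floordiv_eq_ediv_of_pos (by omega : (0:Int) < 2)]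
        set mid := (lo + hi) / 2 with hmid
        have hb : lo + 1 ≤ mid ∧ mid + 1 ≤ hi := by constructor <;> omega
        rw [ih lo mid (by omega) hlo (by omega),
            ih mid hi (by omega) (by omega) hhi]
        have hsplit :
            (order.drop lo.toNat).take (hi - lo).toNat
              = (order.drop lo.toNat).take (mid - lo).toNat
                ++ (order.drop mid.toNat).take (hi - mid).toNat := by
          have hdd : (order.drop lo.toNat).drop (mid - lo).toNat = order.drop mid.toNat := by
            rw [List.drop_drop]; congr 1; omega
          rw [← hdd, ← List.take_add]
          congr 1; omega
        rw [hsplit]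
        simp [pvSum]

theorem foldl_price_eq (order : List String) (init : Int) :
    order.foldl
      (fun money o => if PySem.Str.isIn "cafelatte" o then money + 5000 else money + 4500) init
    = init + pvSum order := by
  induction order generalizing init with
  | nil => simp [pvSum]
  | cons x xs ih =>
    simp only [List.foldl_cons, ih, pvSum, List.map_cons, List.sum_cons, pvPrice]
    split_ifs <;> ring

-- ===== VERDICT (by name: the statement is the Claim_ definition above) =====
theorem solution_spec : Claim_equal_solution := by
  intro order _
  unfold Spec_solution solution solution_alt
  rw [PySem.List.foldl_pyRange_zero_pyGetD' order ""
        (fun money o => if PySem.Str.isIn "cafelatte" o then money + 5000 else money + 4500) 0,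
      foldl_price_eq,
      total_eq_pvSum order order.length 0 order.length (by omega) (by omega) (by omega)]
  simp
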